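-- pv_equiv track=rewrite | github.com/lionestenzol/pre-atlas | services/optogon/src/optogon/adapters/sitepull_adapter.py | _dependency_graph_from_chains
-- ===== SOURCE A (Python) =====
-- _LAYER_TO_NODE_TYPE: dict[str, str] = {
--     "ui": "internal",
--     "api": "internal",
--     "ext": "external",
--     "lib": "package",
--     "state": "internal",
-- }
--
-- def _dependency_graph_from_chains(chains: list[dict]) -> dict:
--     nodes: list[dict] = []
--     edges: list[dict] = []
--     seen: set[str] = set()
--
--     for chain in chains:
--         prev_id: str | None = None
--         for node in chain.get("nodes", []):
--             n_id = str(node.get("n", ""))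
--             if not n_id:
--                 prev_id = None
--                 continue
--             if n_id not in seen:
--                 seen.add(n_id)
--                 layer = node.get("layer", "ui")
--                 nodes.append({
--                     "id": n_id,
--                     "type": _LAYER_TO_NODE_TYPE.get(layer, "internal"),
--                     "name": node.get("label", n_id),
--                 })
--             if prev_id is not None:
--                 edges.append({"from": prev_id, "to": n_id, "relationship": "calls"})
--             prev_id = n_id
--
--     return {"nodes": nodes, "edges": edges}
-- ===== SOURCE B (Python) =====
-- _LAYER_TO_NODE_TYPE: dict[str, str] = {
--     "ui": "internal",
--     "api": "internal",
--     "ext": "external",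
--     "lib": "package",
--     "state": "internal",
-- }
--
-- def _dependency_graph_from_chains(chains: list[dict]) -> dict:
--     # Pass 1: collect first-seen nodes only.
--     nodes: list[dict] = []
--     seen: set[str] = set()
--     for chain in chains:
--         for node in chain.get("nodes", []):
--             n_id = str(node.get("n", ""))
--             if n_id and n_id not in seen:
--                 seen.add(n_id)
--                 nodes.append({
--                     "id": n_id,
--                     "type": _LAYER_TO_NODE_TYPE.get(node.get("layer", "ui"), "internal"),
--                     "name": node.get("label", n_id),
--                 })
--     # Pass 2: per chain, split ids into maximal nonempty runs and pair consecutively.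
--     edges: list[dict] = []
--     for chain in chains:
--         ids = [str(node.get("n", "")) for node in chain.get("nodes", [])]
--         run: list[str] = []
--         for i in ids:
--             if i:
--                 run.append(i)
--             else:
--                 edges += [{"from": a, "to": b, "relationship": "calls"}
--                           for a, b in zip(run, run[1:])]
--                 run = []
--         edges += [{"from": a, "to": b, "relationship": "calls"}
--                   for a, b in zip(run, run[1:])]
--     return {"nodes": nodes, "edges": edges}
-- ===== Notes on version B (the rewrite author's own statement) =====
-- stated objective: alternative
-- what changed: Replaces A's single interleaved pass threading prev_id with two independent passes: a nodes-only first-seen collection pass, then a per-chain pass that splits each chain's id list into maximal nonempty runs and emits edges by pairing consecutive run elements via zip.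
import Mathlib
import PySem

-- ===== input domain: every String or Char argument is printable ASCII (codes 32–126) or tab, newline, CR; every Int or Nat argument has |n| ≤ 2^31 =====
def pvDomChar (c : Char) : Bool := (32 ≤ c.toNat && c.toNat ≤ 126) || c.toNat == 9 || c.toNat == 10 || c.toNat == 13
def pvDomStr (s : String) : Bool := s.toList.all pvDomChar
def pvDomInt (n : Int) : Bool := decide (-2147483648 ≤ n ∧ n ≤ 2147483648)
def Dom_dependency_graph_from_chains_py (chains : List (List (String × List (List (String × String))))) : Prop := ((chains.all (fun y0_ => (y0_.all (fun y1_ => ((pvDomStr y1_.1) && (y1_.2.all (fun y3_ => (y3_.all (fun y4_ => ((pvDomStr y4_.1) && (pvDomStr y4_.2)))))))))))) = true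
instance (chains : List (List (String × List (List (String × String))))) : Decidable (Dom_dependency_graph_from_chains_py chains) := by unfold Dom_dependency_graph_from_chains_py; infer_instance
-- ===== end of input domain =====

-- B replaces A's prev_id threading with two passes: a nodes-only first-seen pass,
-- then per-chain segmentation of the id list into maximal nonempty runs paired by zip
-- (objective: alternative decomposition, same cost).

abbrev PvNode := List (String × String)

def pvLayerToNodeType : PySem.Dict String String :=
  PySem.Dict.ofList [("ui", "internal"), ("api", "internal"), ("ext", "external"),
                     ("lib", "package"), ("state", "internal")]

-- ===== PORT A =====
-- inner loop body of A: state (nodes, edges, seen, prev_id)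
def pvAStep (st : List PvNode × List PvNode × PySem.Set String × Option String)
    (node : PvNode) : List PvNode × List PvNode × PySem.Set String × Option String :=
  let nId := (PySem.Dict.mk node).getD "n" ""
  if nId = "" then (st.1, st.2.1, st.2.2.1, none)
  else
    let ns :=
      if PySem.Set.contains st.2.2.1 nId then (st.1, st.2.2.1)
      else
        (st.1 ++ [[("id", nId),
                   ("type", pvLayerToNodeType.getD ((PySem.Dict.mk node).getD "layer" "ui") "internal"),
                   ("name", (PySem.Dict.mk node).getD "label" nId)]],
         PySem.Set.add st.2.2.1 nId)
    let es :=
      match st.2.2.2 with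
      | some p => st.2.1 ++ [[("from", p), ("to", nId), ("relationship", "calls")]]
      | none => st.2.1
    (ns.1, es, ns.2, some nId)

-- outer loop body of A: prev_id is reset to None per chain and discarded afterwards
def pvAChain (st : List PvNode × List PvNode × PySem.Set String)
    (chain : List (String × List PvNode)) : List PvNode × List PvNode × PySem.Set String :=
  let r := ((PySem.Dict.mk chain).getD "nodes" []).foldl pvAStep (st.1, st.2.1, st.2.2, none)
  (r.1, r.2.1, r.2.2.1)

def dependency_graph_from_chains_py (chains : List (List (String × List (List (String × String))))) : List (String × List (List (String × String))) :=
  let st := chains.foldl pvAChain ([], [], PySem.Set.empty)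
  [("nodes", st.1), ("edges", st.2.1)]

-- ===== PORT B =====
def pvEdgeDict (a b : String) : PvNode := [("from", a), ("to", b), ("relationship", "calls")]

-- [{...} for a, b in zip(run, run[1:])]
def pvRunEdges (run : List String) : List PvNode :=
  (run.zip run.tail).map (fun p => pvEdgeDict p.1 p.2)

-- pass-1 loop body: state (nodes, seen)
def pvBNodeStep (st : List PvNode × PySem.Set String) (node : PvNode) :
    List PvNode × PySem.Set String :=
  let nId := (PySem.Dict.mk node).getD "n" ""
  if nId ≠ "" ∧ PySem.Set.contains st.2 nId = false then
    (st.1 ++ [[("id", nId),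
               ("type", pvLayerToNodeType.getD ((PySem.Dict.mk node).getD "layer" "ui") "internal"),
               ("name", (PySem.Dict.mk node).getD "label" nId)]],
     PySem.Set.add st.2 nId)
  else st

def pvBNodeChain (st : List PvNode × PySem.Set String) (chain : List (String × List PvNode)) :
    List PvNode × PySem.Set String :=
  ((PySem.Dict.mk chain).getD "nodes" []).foldl pvBNodeStep st

-- pass-2 run accumulator: state (edges, run); an empty id flushes the run
def pvBEdgeStep (st : List PvNode × List String) (i : String) : List PvNode × List String :=
  if i ≠ "" then (st.1, st.2 ++ [i]) else (st.1 ++ pvRunEdges st.2, [])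

def pvBEdgeChain (edges : List PvNode) (chain : List (String × List PvNode)) : List PvNode :=
  let ids := ((PySem.Dict.mk chain).getD "nodes" []).map (fun node => (PySem.Dict.mk node).getD "n" "")
  let r := ids.foldl pvBEdgeStep (edges, [])
  r.1 ++ pvRunEdges r.2

def dependency_graph_from_chains_py_alt (chains : List (List (String × List (List (String × String))))) : List (String × List (List (String × String))) :=
  let ns := chains.foldl pvBNodeChain ([], PySem.Set.empty)
  let edges := chains.foldl pvBEdgeChain []
  [("nodes", ns.1), ("edges", edges)]

-- ===== PRECONDITION & SPEC =====
def Spec_dependency_graph_from_chains_py (chains : List (List (String × List (List (String × String))))) (out : List (String × List (List (String × String)))) : Prop := out = dependency_graph_from_chains_py_alt chains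
instance (chains : List (List (String × List (List (String × String))))) (out : List (String × List (List (String × String)))) : Decidable (Spec_dependency_graph_from_chains_py chains out) := by unfold Spec_dependency_graph_from_chains_py; infer_instance

-- ===== CLAIM (what is proved, stated in full; the proofs are below) =====
def Claim_equal_dependency_graph_from_chains_py : Prop := ∀ (chains : List (List (String × List (List (String × String))))), Dom_dependency_graph_from_chains_py chains → Spec_dependency_graph_from_chains_py chains (dependency_graph_from_chains_py chains)

-- ===== LEMMAS AND PROOFS =====
-- A's (edges, prev_id) transition, isolated from the (nodes, seen) component
def pvEPStep (st : List PvNode × Option String) (i : String) : List PvNode × Option String :=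
  if i = "" then (st.1, none)
  else
    (match st.2 with
     | some p => st.1 ++ [pvEdgeDict p i]
     | none => st.1,
     some i)

theorem pvRunEdges_cons_cons (a h : String) (t : List String) :
    pvRunEdges (a :: h :: t) = pvEdgeDict a h :: pvRunEdges (h :: t) := rfl

theorem pvRunEdges_snoc (run : List String) (i : String) :
    pvRunEdges (run ++ [i]) =
      pvRunEdges run ++
        (match run.getLast? with
         | some p => [pvEdgeDict p i]
         | none => []) := by
  induction run with
  | nil => rfl
  | cons a rs ih =>
    cases rs with
    | nil => rfl
    | cons b t =>
      simp only [List.cons_append] at ih ⊢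
      rw [pvRunEdges_cons_cons, ih, List.getLast?_cons_cons, pvRunEdges_cons_cons,
        List.cons_append]

theorem pvAStep_split (l : List PvNode) (ns es : List PvNode) (sn : PySem.Set String)
    (pv : Option String) :
    l.foldl pvAStep (ns, es, sn, pv) =
      ((l.foldl pvBNodeStep (ns, sn)).1,
       ((l.map (fun node => (PySem.Dict.mk node).getD "n" "")).foldl pvEPStep (es, pv)).1,
       (l.foldl pvBNodeStep (ns, sn)).2,
       ((l.map (fun node => (PySem.Dict.mk node).getD "n" "")).foldl pvEPStep (es, pv)).2) := by
  induction l generalizing ns es sn pv with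
  | nil => rfl
  | cons node t ih =>
    simp only [List.foldl_cons, List.map_cons]
    rw [show pvAStep (ns, es, sn, pv) node =
        ((pvBNodeStep (ns, sn) node).1,
         (pvEPStep (es, pv) ((PySem.Dict.mk node).getD "n" "")).1,
         (pvBNodeStep (ns, sn) node).2,
         (pvEPStep (es, pv) ((PySem.Dict.mk node).getD "n" "")).2) from ?_]
    · exact ih _ _ _ _
    · simp only [pvAStep, pvBNodeStep, pvEPStep]
      by_cases h : (PySem.Dict.mk node).getD "n" "" = ""
      · simp [h]
      · simp [h, pvEdgeDict]

theorem pvEP_run (ids : List String) (es : List PvNode) (run : List String) :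
    ids.foldl pvEPStep (es ++ pvRunEdges run, run.getLast?) =
      ((ids.foldl pvBEdgeStep (es, run)).1 ++ pvRunEdges (ids.foldl pvBEdgeStep (es, run)).2,
       (ids.foldl pvBEdgeStep (es, run)).2.getLast?) := by
  induction ids generalizing es run with
  | nil => rfl
  | cons i t ih =>
    simp only [List.foldl_cons]
    by_cases h : i = ""
    · rw [show pvEPStep (es ++ pvRunEdges run, run.getLast?) i = (es ++ pvRunEdges run, none) from by
        simp [pvEPStep, h]]
      rw [show pvBEdgeStep (es, run) i = (es ++ pvRunEdges run, []) from by
        simp [pvBEdgeStep, h]]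
      have := ih (es ++ pvRunEdges run) []
      simpa [pvRunEdges] using this
    · rw [show pvEPStep (es ++ pvRunEdges run, run.getLast?) i
            = (es ++ pvRunEdges (run ++ [i]), (run ++ [i]).getLast?) from ?_]
      rw [show pvBEdgeStep (es, run) i = (es, run ++ [i]) from by simp [pvBEdgeStep, h]]
      · exact ih es (run ++ [i])
      · simp only [pvEPStep, h, if_false, pvRunEdges_snoc, List.getLast?_concat]
        cases hr : run.getLast? with
        | none =>
          have : run = [] := List.getLast?_eq_none_iff.mp hr
          simp [this]
        | some p => simp

theorem pv_main (chains : List (List (String × List PvNode)))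
    (ns es : List PvNode) (sn : PySem.Set String) :
    chains.foldl pvAChain (ns, es, sn) =
      ((chains.foldl pvBNodeChain (ns, sn)).1,
       chains.foldl pvBEdgeChain es,
       (chains.foldl pvBNodeChain (ns, sn)).2) := by
  induction chains generalizing ns es sn with
  | nil => rfl
  | cons chain t ih =>
    simp only [List.foldl_cons]
    rw [show pvAChain (ns, es, sn) chain =
        ((pvBNodeChain (ns, sn) chain).1, pvBEdgeChain es chain, (pvBNodeChain (ns, sn) chain).2)
        from ?_]
    · exact ih _ _ _
    · simp only [pvAChain, pvBNodeChain, pvBEdgeChain, pvAStep_split]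
      have := pvEP_run (((PySem.Dict.mk chain).getD "nodes" []).map
        (fun node => (PySem.Dict.mk node).getD "n" "")) es []
      simp only [pvRunEdges, List.zip_nil_left, List.map_nil, List.append_nil,
        List.getLast?_nil] at this ⊢
      rw [this]

-- ===== VERDICT (by name: the statement is the Claim_ definition above) =====
theorem dependency_graph_from_chains_py_spec : Claim_equal_dependency_graph_from_chains_py := by
  intro chains _
  unfold Spec_dependency_graph_from_chains_py dependency_graph_from_chains_py
    dependency_graph_from_chains_py_alt
  rw [pv_main]
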